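-- pv_equiv track=rewrite | github.com/MrBrantCode/unitest_baseline | mut_generate/mist_train_cf/cf_20793/solution.py | reverse_and_sum
-- ===== SOURCE A (Python) =====
-- def reverse_and_sum(arr):
--     """
--     Reverses the input array in-place and returns the reversed array along with its sum.
--
--     Args:
--         arr (list): A list of integers.
--
--     Returns:
--         tuple: A tuple containing the reversed array and its sum.
--     """
--     total = 0
--     left = 0
--     right = len(arr) - 1
--
--     while left < right:
--         # Swap elements at left and right pointers
--         arr[left], arr[right] = arr[right], arr[left]
--         total += arr[left] + arr[right]
--         left += 1
--         right -= 1
--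
--     # Add the middle element if the array length is odd
--     if left == right:
--         total += arr[left]
--
--     return arr, total
-- ===== SOURCE B (Python) =====
-- def reverse_and_sum(arr):
--     arr.reverse()
--     total = sum(arr)
--     return arr, total
-- ===== Notes on version B (the rewrite author's own statement) =====
-- stated objective: idiomatic
-- what changed: Replaces the manual two-pointer swap loop with a running sum accumulator by two built-in passes: in-place arr.reverse() followed by sum(arr).
import Mathlib
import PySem

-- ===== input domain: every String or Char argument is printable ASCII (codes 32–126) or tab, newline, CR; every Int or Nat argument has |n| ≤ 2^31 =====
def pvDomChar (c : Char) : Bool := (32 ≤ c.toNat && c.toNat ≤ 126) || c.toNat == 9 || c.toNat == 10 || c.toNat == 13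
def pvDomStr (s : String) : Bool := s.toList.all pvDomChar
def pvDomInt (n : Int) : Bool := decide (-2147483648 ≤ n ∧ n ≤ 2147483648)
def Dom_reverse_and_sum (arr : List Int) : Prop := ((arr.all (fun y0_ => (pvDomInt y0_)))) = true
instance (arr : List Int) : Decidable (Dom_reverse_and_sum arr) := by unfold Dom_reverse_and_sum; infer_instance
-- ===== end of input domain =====

-- B replaces A's manual two-pointer swap loop (with a running sum accumulator) by two
-- idiomatic built-in passes: an in-place reverse followed by sum; return value proved equal,
-- and both mutate the argument list in place identically (full reversal).

-- ===== PORT A =====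
-- the while-loop of A: state (arr, total, left, right), swapping and accumulating
def rsLoopA (arr : List Int) (total left right : Int) : List Int × Int :=
  if h : left < right then
    let a := (PySem.List.pyGet? arr left).getD 0
    let b := (PySem.List.pyGet? arr right).getD 0
    let arr' := (arr.set left.toNat b).set right.toNat a
    rsLoopA arr'
      (total + (PySem.List.pyGet? arr' left).getD 0 + (PySem.List.pyGet? arr' right).getD 0)
      (left + 1) (right - 1)
  else if left = right then
    (arr, total + (PySem.List.pyGet? arr left).getD 0)
  else
    (arr, total)
termination_by (right - left).toNat
decreasing_by omega

def reverse_and_sum (arr : List Int) : List Int × Int :=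
  rsLoopA arr 0 0 ((arr.length : Int) - 1)

-- ===== PORT B =====
def reverse_and_sum_alt (arr : List Int) : List Int × Int :=
  let rev := arr.reverse
  (rev, rev.sum)

-- ===== PRECONDITION & SPEC =====
def Spec_reverse_and_sum (arr : List Int) (out : List Int × Int) : Prop := out = reverse_and_sum_alt arr
instance (arr : List Int) (out : List Int × Int) : Decidable (Spec_reverse_and_sum arr out) := by unfold Spec_reverse_and_sum; infer_instance

-- ===== CLAIM (what is proved, stated in full; the proofs are below) =====
def Claim_equal_reverse_and_sum : Prop := ∀ (arr : List Int), Dom_reverse_and_sum arr → Spec_reverse_and_sum arr (reverse_and_sum arr)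

-- ===== LEMMAS AND PROOFS =====

-- setting the element just past a prefix
lemma set_append_length (p tail : List Int) (x v : Int) :
    (p ++ x :: tail).set p.length v = p ++ v :: tail := by
  induction p with
  | nil => simp
  | cons a p ih => simp [ih]

-- the loop invariant: working on the segment m (between prefix p and suffix s),
-- the loop reverses m in place and adds its sum to the accumulator
lemma rsLoopA_eq : ∀ (n : Nat) (m p s : List Int) (t L R : Int),
    m.length = n → L = (p.length : Int) → R = L + m.length - 1 →
    rsLoopA (p ++ m ++ s) t L R = (p ++ m.reverse ++ s, t + m.sum) := by
  intro n
  induction n using Nat.strong_induction_on with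
  | _ n ih =>
    intro m p s t L R hlen hL hR
    match m with
    | [] =>
      rw [rsLoopA]
      rw [dif_neg (by simp at hR; omega)]
      rw [if_neg (by simp at hR; omega)]
      simp
    | [x] =>
      have hLR : L = R := by simp at hR; omega
      rw [rsLoopA]
      rw [dif_neg (by omega)]
      rw [if_pos hLR]
      have : (p ++ [x] ++ s) = p ++ x :: s := by simp
      rw [this, hL, PySem.List.pyGet?_append_length]
      simp
    | x :: z :: rest =>
      have hne : (z :: rest) ≠ [] := by simp
      obtain ⟨mid, y, hm⟩ : ∃ mid y, z :: rest = mid ++ [y] :=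
        ⟨(z :: rest).dropLast, (z :: rest).getLast hne,
          (List.dropLast_append_getLast hne).symm⟩
      rw [hm] at hlen hR ⊢
      have hlt : L < R := by simp at hR; omega
      rw [rsLoopA]
      rw [dif_pos hlt]
      dsimp only
      -- the element reads and writes
      have harr : p ++ (x :: (mid ++ [y])) ++ s = p ++ x :: (mid ++ y :: s) := by simp
      have harrR : p ++ (x :: (mid ++ [y])) ++ s = (p ++ x :: mid) ++ y :: s := by simp
      have hRlen : R = ((p ++ x :: mid).length : Int) := by
        simp at hR ⊢; omega
      have hLt : L.toNat = p.length := by omega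
      have hRt : R.toNat = (p ++ x :: mid).length := by
        simp at hRlen ⊢; omega
      have hget_a : (PySem.List.pyGet? (p ++ (x :: (mid ++ [y])) ++ s) L).getD 0 = x := by
        rw [harr, hL, PySem.List.pyGet?_append_length]; rfl
      have hget_b : (PySem.List.pyGet? (p ++ (x :: (mid ++ [y])) ++ s) R).getD 0 = y := by
        rw [harrR, hRlen, PySem.List.pyGet?_append_length]; rfl
      rw [hget_a, hget_b]
      have hset : ((p ++ (x :: (mid ++ [y])) ++ s).set L.toNat y).set R.toNat x
          = (p ++ y :: mid) ++ x :: s := by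
        rw [harr, hLt, set_append_length]
        have : p ++ y :: (mid ++ y :: s) = (p ++ y :: mid) ++ y :: s := by simp
        rw [this, hRt]
        have hlen2 : (p ++ x :: mid).length = (p ++ y :: mid).length := by simp
        rw [hlen2, set_append_length]
      rw [hset]
      have hget_a' : (PySem.List.pyGet? ((p ++ y :: mid) ++ x :: s) L).getD 0 = y := by
        have : (p ++ y :: mid) ++ x :: s = p ++ y :: (mid ++ x :: s) := by simp
        rw [this, hL, PySem.List.pyGet?_append_length]; rfl
      have hget_b' : (PySem.List.pyGet? ((p ++ y :: mid) ++ x :: s) R).getD 0 = x := by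
        have hRlen' : R = ((p ++ y :: mid).length : Int) := by simp at hRlen ⊢; omega
        rw [hRlen', PySem.List.pyGet?_append_length]; rfl
      rw [hget_a', hget_b']
      -- apply the induction hypothesis on the inner segment mid
      have hrec := ih mid.length (by simp at hlen; omega) mid (p ++ [y]) (x :: s)
        (t + y + x) (L + 1) (R - 1)
        rfl (by simp; omega) (by simp at hR ⊢; omega)
      have hlist : (p ++ y :: mid) ++ x :: s = (p ++ [y]) ++ mid ++ x :: s := by simp
      rw [hlist, hrec]
      simp only [Prod.mk.injEq]
      constructor
      · simp
      · simp; ring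

theorem reverse_and_sum_eq_alt (arr : List Int) :
    reverse_and_sum arr = reverse_and_sum_alt arr := by
  have h := rsLoopA_eq arr.length arr [] [] 0 0 ((arr.length : Int) - 1)
    rfl (by simp) (by simp)
  simp at h
  unfold reverse_and_sum reverse_and_sum_alt
  rw [h]
  simp [List.sum_reverse]

-- ===== VERDICT (by name: the statement is the Claim_ definition above) =====
theorem reverse_and_sum_spec : Claim_equal_reverse_and_sum := by
  intro arr _
  exact reverse_and_sum_eq_alt arr
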